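-- pv_equiv track=rewrite | github.com/Nicokac/portafolio-iol | apps/dashboard/incremental_future_purchases.py | _build_incremental_future_purchase_source_counts
-- ===== SOURCE A (Python) =====
-- from typing import Dict, List
--
-- def _build_incremental_future_purchase_source_counts(items: list[Dict]) -> Dict[str, int]:
--     return {
--         "backlog_nuevo": sum(
--             1 for item in items if str((item.get("future_purchase_context") or {}).get("source") or "") == "backlog_nuevo"
--         ),
--         "reactivadas": sum(
--             1 for item in items if str((item.get("future_purchase_context") or {}).get("source") or "") == "reactivadas"
--         ),
--     }
-- ===== SOURCE B (Python) =====
-- def _build_incremental_future_purchase_source_counts(items):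
--     counts = {"backlog_nuevo": 0, "reactivadas": 0}
--     for item in items:
--         source = str((item.get("future_purchase_context") or {}).get("source") or "")
--         if source in counts:
--             counts[source] += 1
--     return counts
-- ===== Notes on version B (the rewrite author's own statement) =====
-- stated objective: simpler
-- what changed: Replaces the two independent generator-filter passes over the list with a single loop that maintains a running count table for both categories.
import Mathlib
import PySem

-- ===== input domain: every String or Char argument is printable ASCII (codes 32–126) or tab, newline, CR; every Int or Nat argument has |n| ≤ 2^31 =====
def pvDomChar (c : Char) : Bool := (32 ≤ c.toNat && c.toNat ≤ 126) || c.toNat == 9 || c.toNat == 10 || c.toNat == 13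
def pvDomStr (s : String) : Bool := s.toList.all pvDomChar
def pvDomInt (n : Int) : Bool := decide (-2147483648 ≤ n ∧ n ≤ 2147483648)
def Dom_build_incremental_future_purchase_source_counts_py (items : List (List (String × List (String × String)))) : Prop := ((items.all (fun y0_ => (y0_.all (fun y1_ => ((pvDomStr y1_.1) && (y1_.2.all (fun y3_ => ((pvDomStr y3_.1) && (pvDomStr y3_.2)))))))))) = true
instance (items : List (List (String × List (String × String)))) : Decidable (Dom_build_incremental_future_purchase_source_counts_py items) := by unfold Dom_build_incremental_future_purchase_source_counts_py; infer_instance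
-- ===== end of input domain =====

-- B replaces A's two independent filter-count passes with one loop keeping a running count table (objective: simpler).

-- ===== PORT A =====
-- shared helper: str((item.get("future_purchase_context") or {}).get("source") or "")
def pvFPSource (item : List (String × List (String × String))) : String :=
  let ctx : List (String × String) :=
    match (item.find? (fun p => p.1 == "future_purchase_context")).map (·.2) with
    | some d => if d.isEmpty then [] else d
    | none => []
  match (ctx.find? (fun p => p.1 == "source")).map (·.2) with
  | some v => if v == "" then "" else v
  | none => ""

def build_incremental_future_purchase_source_counts_py (items : List (List (String × List (String × String)))) : List (String × Int) :=
  [("backlog_nuevo",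
      items.foldl (fun acc item => if pvFPSource item == "backlog_nuevo" then acc + 1 else acc) 0),
   ("reactivadas",
      items.foldl (fun acc item => if pvFPSource item == "reactivadas" then acc + 1 else acc) 0)]

-- ===== PORT B =====
-- one iteration of B's loop: if source in counts: counts[source] += 1
def pvStepB (counts : List (String × Int)) (item : List (String × List (String × String))) : List (String × Int) :=
  let s := pvFPSource item
  if counts.any (fun p => p.1 == s) then
    counts.map (fun p => if p.1 == s then (p.1, p.2 + 1) else p)
  else counts

def build_incremental_future_purchase_source_counts_py_alt (items : List (List (String × List (String × String)))) : List (String × Int) :=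
  items.foldl pvStepB [("backlog_nuevo", 0), ("reactivadas", 0)]

-- ===== PRECONDITION & SPEC =====
def Spec_build_incremental_future_purchase_source_counts_py (items : List (List (String × List (String × String)))) (out : List (String × Int)) : Prop := out = build_incremental_future_purchase_source_counts_py_alt items
instance (items : List (List (String × List (String × String)))) (out : List (String × Int)) : Decidable (Spec_build_incremental_future_purchase_source_counts_py items out) := by unfold Spec_build_incremental_future_purchase_source_counts_py; infer_instance

-- ===== CLAIM (what is proved, stated in full; the proofs are below) =====
def Claim_equal_build_incremental_future_purchase_source_counts_py : Prop := ∀ (items : List (List (String × List (String × String)))), Dom_build_incremental_future_purchase_source_counts_py items → Spec_build_incremental_future_purchase_source_counts_py items (build_incremental_future_purchase_source_counts_py items)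

-- ===== LEMMAS AND PROOFS =====
theorem pvCountShift (p : List (String × List (String × String)) → Prop) [DecidablePred p]
    (items : List (List (String × List (String × String)))) (a : Int) :
    items.foldl (fun acc item => if p item then acc + 1 else acc) a
      = a + items.foldl (fun acc item => if p item then acc + 1 else acc) 0 := by
  induction items generalizing a with
  | nil => simp
  | cons x xs ih =>
    simp only [List.foldl_cons]
    rw [ih, ih (if p x then (0:Int) + 1 else 0)]
    split <;> omega

theorem pvMain (items : List (List (String × List (String × String)))) (b r : Int) :
    items.foldl pvStepB [("backlog_nuevo", b), ("reactivadas", r)]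
      = [("backlog_nuevo",
            b + items.foldl (fun acc item => if pvFPSource item == "backlog_nuevo" then acc + 1 else acc) 0),
         ("reactivadas",
            r + items.foldl (fun acc item => if pvFPSource item == "reactivadas" then acc + 1 else acc) 0)] := by
  induction items generalizing b r with
  | nil => simp
  | cons x xs ih =>
    simp only [List.foldl_cons]
    by_cases h1 : pvFPSource x = "backlog_nuevo"
    · simp only [pvStepB, h1]
      simp
      rw [ih]
      simp only [beq_iff_eq]
      rw [pvCountShift (fun item => pvFPSource item = "backlog_nuevo") xs 1]
      simp only [List.cons.injEq, Prod.mk.injEq, and_true, true_and]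
      omega
    · by_cases h2 : pvFPSource x = "reactivadas"
      · simp only [pvStepB, h2]
        simp
        rw [ih]
        simp only [beq_iff_eq]
        rw [pvCountShift (fun item => pvFPSource item = "reactivadas") xs 1]
        simp only [List.cons.injEq, Prod.mk.injEq, and_true, true_and]
        omega
      · have e1 : (pvFPSource x == "backlog_nuevo") = false := by simp [h1]
        have e2 : (pvFPSource x == "reactivadas") = false := by simp [h2]
        have e1' : ("backlog_nuevo" == pvFPSource x) = false := by
          simp only [beq_eq_false_iff_ne]; exact fun h => h1 h.symm
        have e2' : ("reactivadas" == pvFPSource x) = false := by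
          simp only [beq_eq_false_iff_ne]; exact fun h => h2 h.symm
        simp only [pvStepB, e1, e2, e1', e2', List.any_cons, List.any_nil, Bool.or_self,
          Bool.false_eq_true, if_false]
        exact ih b r

-- ===== VERDICT (by name: the statement is the Claim_ definition above) =====
theorem build_incremental_future_purchase_source_counts_py_spec : Claim_equal_build_incremental_future_purchase_source_counts_py := by
  intro items _
  unfold Spec_build_incremental_future_purchase_source_counts_py
  unfold build_incremental_future_purchase_source_counts_py build_incremental_future_purchase_source_counts_py_alt
  rw [pvMain]
  norm_num
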